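-- pv_equiv track=rewrite | github.com/d2emon/worldwalker | src/bgmap.py | by_points
-- ===== SOURCE A (Python) =====
-- def by_points(points, sea=[]):
--     size = 128
--     lines = dict()
--     sealines = dict()
--     for s in sea:
--         sealine = sealines.get(s[1])
--         if sealine is None:
--             sealine = []
--             sealines[s[1]] = sealine
--         sealine.append(s[0])
--     for i in range(size):
--         lines[i] = []
--     edges = [(p, points[i-1]) for i, p in enumerate(points)]
--     for edge in edges:
--         maxx = max([edge[0][0], edge[1][0]])
--         minx = min([edge[0][0], edge[1][0]])
--         maxy = max([edge[0][1], edge[1][1]])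
--         miny = min([edge[0][1], edge[1][1]])
--
--         for x in range(minx, maxx + 1):
--             lines[maxy].append(x)
--         for y in range(miny, maxy + 1):
--             lines[y].append(maxx)
--
--     p = []
--     for j in range(size):
--         line = lines.get(j)
--         if not line:
--             continue
--         sealine = sealines.get(j)
--         if sealine is None:
--             sealine = []
--         line.sort()
--         # for i in line:
--         for i in range(line[0], line[-1] + 1):
--             if i in sealine:
--                 continue
--             p.append((i, j))
--     return p
-- ===== SOURCE B (Python) =====
-- def by_points(points, sea=[]):
--     size = 128
--     seas = {}
--     for x, y in sea:
--         seas[y] = seas.get(y, []) + [x]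
--     # per-row (lowest x, highest x) instead of per-row list of every x
--     bounds = {}
--
--     def upd(j, x):
--         b = bounds.get(j)
--         bounds[j] = (x, x) if b is None else (min(b[0], x), max(b[1], x))
--
--     for i in range(len(points)):
--         (x0, y0), (x1, y1) = points[i], points[i - 1]
--         lo, hi = min(y0, y1), max(y0, y1)
--         upd(hi, min(x0, x1))
--         for y in range(lo, hi + 1):
--             upd(y, max(x0, x1))
--
--     return [(x, j)
--             for j in range(size) if bounds.get(j) is not None
--             for x in range(bounds[j][0], bounds[j][1] + 1)
--             if x not in seas.get(j, [])]
-- ===== Notes on version B (the rewrite author's own statement) =====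
-- stated objective: alternative
-- what changed: A appends every x of each edge span to a per-row list and later sorts each row just to read its first and last element; B keeps only a per-row (min x, max x) pair updated in place and emits the filled rows with a single comprehension, with no per-row lists and no sort.
import Mathlib
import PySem

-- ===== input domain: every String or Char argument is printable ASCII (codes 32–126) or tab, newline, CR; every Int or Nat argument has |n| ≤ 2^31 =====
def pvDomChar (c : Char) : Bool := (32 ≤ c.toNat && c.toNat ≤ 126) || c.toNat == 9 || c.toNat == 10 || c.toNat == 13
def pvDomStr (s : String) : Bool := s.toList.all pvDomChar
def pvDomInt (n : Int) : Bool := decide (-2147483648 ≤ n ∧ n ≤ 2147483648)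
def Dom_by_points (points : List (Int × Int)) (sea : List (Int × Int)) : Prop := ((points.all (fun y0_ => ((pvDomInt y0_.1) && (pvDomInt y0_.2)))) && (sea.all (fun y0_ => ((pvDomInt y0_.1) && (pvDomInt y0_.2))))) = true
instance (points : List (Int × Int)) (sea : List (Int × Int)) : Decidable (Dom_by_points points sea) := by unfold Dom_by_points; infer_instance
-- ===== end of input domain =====

-- B replaces A's per-row lists of every outline x (append loops, then a per-row sort to read off the
-- ends) by one per-row (min x, max x) pair updated in place, emitting the rows with one comprehension
-- (alternative decomposition, same cost on the shared fill loop); return value only, neither version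
-- observably mutates its arguments.

-- ===== PORT A =====
-- sealines loop body: sealine = sealines.get(s[1]); if None insert a fresh list; append s[0]
def seaStepA (d : PySem.Dict Int (List Int)) (s : Int × Int) : PySem.Dict Int (List Int) :=
  match d.get? s.2 with
  | none => d.insert s.2 [s.1]
  | some sealine => d.insert s.2 (sealine ++ [s.1])

-- per-edge body: append each x of [minx..maxx] to lines[maxy], then maxx to lines[y] for y in [miny..maxy]
def edgeStepA (d : PySem.Dict Int (List Int)) (edge : (Int × Int) × (Int × Int)) : PySem.Dict Int (List Int) :=
  let maxx := max edge.1.1 edge.2.1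
  let minx := min edge.1.1 edge.2.1
  let maxy := max edge.1.2 edge.2.2
  let miny := min edge.1.2 edge.2.2
  let d := (PySem.List.pyRange minx (maxx + 1)).foldl (fun d x => d.insert maxy (d.getD maxy [] ++ [x])) d
  (PySem.List.pyRange miny (maxy + 1)).foldl (fun d y => d.insert y (d.getD y [] ++ [maxx])) d

-- final loop body for row j: skip falsy (empty/missing) line, sort, emit line[0]..line[-1] skipping sea x's
def rowStepA (lines sealines : PySem.Dict Int (List Int)) (p : List (Int × Int)) (j : Int) : List (Int × Int) :=
  let line := lines.getD j []
  if line = [] then p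
  else
    let sealine := sealines.getD j []
    let sline := PySem.List.sorted line (fun x => x)
    (PySem.List.pyRange (PySem.List.pyGetD sline 0 0) (PySem.List.pyGetD sline (-1) 0 + 1)).foldl
      (fun p i => if sealine.contains i then p else p ++ [(i, j)]) p

def by_points (points : List (Int × Int)) (sea : List (Int × Int)) : List (Int × Int) :=
  let size : Int := 128
  let sealines := sea.foldl seaStepA PySem.Dict.empty
  let lines0 := (PySem.List.pyRange 0 size).foldl (fun d i => d.insert i ([] : List Int)) PySem.Dict.empty
  -- edges = [(p, points[i-1]) for i, p in enumerate(points)]; points[i-1] exists whenever enumerate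
  -- yields a pair (points is nonempty, -1 wraps), so the .getD default is unreachable
  let edges := (PySem.List.enumerate points).map
    (fun ip => (ip.2, (PySem.List.pyGet? points (ip.1 - 1)).getD (0, 0)))
  let lines := edges.foldl edgeStepA lines0
  (PySem.List.pyRange 0 size).foldl (rowStepA lines sealines) []

-- ===== PORT B =====
-- upd(j, x): b = bounds.get(j); (x, x) if absent else (min(b[0], x), max(b[1], x))
def updB (d : PySem.Dict Int (Int × Int)) (j x : Int) : PySem.Dict Int (Int × Int) :=
  match d.get? j with
  | none => d.insert j (x, x)
  | some b => d.insert j (min b.1 x, max b.2 x)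

-- per-edge body of B: upd(hi, min x), then upd(y, max x) for y in [lo..hi]
def edgeStepB (d : PySem.Dict Int (Int × Int)) (e : (Int × Int) × (Int × Int)) : PySem.Dict Int (Int × Int) :=
  let lo := min e.1.2 e.2.2
  let hi := max e.1.2 e.2.2
  let d := updB d hi (min e.1.1 e.2.1)
  (PySem.List.pyRange lo (hi + 1)).foldl (fun d y => updB d y (max e.1.1 e.2.1)) d

-- one row of the output comprehension
def rowOutB (bounds : PySem.Dict Int (Int × Int)) (seas : PySem.Dict Int (List Int)) (j : Int) : List (Int × Int) :=
  match bounds.get? j with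
  | none => []
  | some b => ((PySem.List.pyRange b.1 (b.2 + 1)).filter (fun x => !((seas.getD j []).contains x))).map (fun x => (x, j))

def by_points_alt (points : List (Int × Int)) (sea : List (Int × Int)) : List (Int × Int) :=
  let size : Int := 128
  let seas := sea.foldl (fun d s => d.insert s.2 (d.getD s.2 [] ++ [s.1])) (PySem.Dict.empty : PySem.Dict Int (List Int))
  let bounds := (PySem.List.pyRange 0 (points.length : Int)).foldl
    (fun d i => edgeStepB d ((PySem.List.pyGet? points i).getD (0, 0), (PySem.List.pyGet? points (i - 1)).getD (0, 0)))
    PySem.Dict.empty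
  (PySem.List.pyRange 0 size).flatMap (rowOutB bounds seas)

-- ===== PRECONDITION & SPEC =====
-- Pre_ excludes exactly the inputs where the Python A raises KeyError: some vertex y outside 0..127,
-- so lines[maxy] (or lines[y] in the edge loop) misses the 128 preallocated rows.
def Pre_by_points (points : List (Int × Int)) (sea : List (Int × Int)) : Prop :=
  ∀ p ∈ points, 0 ≤ p.2 ∧ p.2 < 128
instance (points : List (Int × Int)) (sea : List (Int × Int)) : Decidable (Pre_by_points points sea) := by
  unfold Pre_by_points; infer_instance

def pvWitness_by_points : (List (Int × Int)) × (List (Int × Int)) := ([(0, 0), (3, 2), (2, 4)], [(1, 1)])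

def Spec_by_points (points : List (Int × Int)) (sea : List (Int × Int)) (out : List (Int × Int)) : Prop := out = by_points_alt points sea
instance (points : List (Int × Int)) (sea : List (Int × Int)) (out : List (Int × Int)) : Decidable (Spec_by_points points sea out) := by unfold Spec_by_points; infer_instance

-- ===== CLAIM (what is proved, stated in full; the proofs are below) =====
def Claim_equal_by_points : Prop := ∀ (points : List (Int × Int)) (sea : List (Int × Int)), Dom_by_points points sea → Pre_by_points points sea → Spec_by_points points sea (by_points points sea)

-- ===== LEMMAS AND PROOFS =====

-- abstract per-row state of B: none / some (min so far, max so far)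
def updO (o : Option (Int × Int)) (x : Int) : Option (Int × Int) :=
  match o with
  | none => some (x, x)
  | some b => some (min b.1 x, max b.2 x)

-- the x's edge e contributes to row j in A
def chunk (j : Int) (e : (Int × Int) × (Int × Int)) : List Int :=
  (if j = max e.1.2 e.2.2 then PySem.List.pyRange (min e.1.1 e.2.1) (max e.1.1 e.2.1 + 1) else []) ++
  (if j ∈ PySem.List.pyRange (min e.1.2 e.2.2) (max e.1.2 e.2.2 + 1) then [max e.1.1 e.2.1] else [])

-- the update edge e performs on row j's state in B
def stepRow (j : Int) (e : (Int × Int) × (Int × Int)) (o : Option (Int × Int)) : Option (Int × Int) :=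
  let o := if j = max e.1.2 e.2.2 then updO o (min e.1.1 e.2.1) else o
  if j ∈ PySem.List.pyRange (min e.1.2 e.2.2) (max e.1.2 e.2.2 + 1) then updO o (max e.1.1 e.2.1) else o

-- (min, max) of a list, as A's loops accumulate it
def bnd : List Int → Option (Int × Int)
  | [] => none
  | h :: t => some (t.foldl min h, t.foldl max h)

-- the edge both programs build from index k: (points[k], points[k-1])
def edgeAt (points : List (Int × Int)) (k : Nat) : (Int × Int) × (Int × Int) :=
  (points.getD k (0, 0), (PySem.List.pyGet? points ((k : Int) - 1)).getD (0, 0))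

lemma nodup_pyRange (a b : Int) : (PySem.List.pyRange a b).Nodup := by
  rw [PySem.List.pyRange_of_pos a b (by norm_num)]
  refine List.Nodup.map ?_ List.nodup_range
  intro x y h
  simp only [one_mul, add_right_inj, Nat.cast_inj] at h
  exact h

lemma enum_eq (points : List (Int × Int)) : ∀ s : Int,
    PySem.List.enumerate points s =
      (List.range points.length).map (fun (k : Nat) => (s + (k : Int), points.getD k (0, 0))) := by
  induction points with
  | nil => intro s; simp [PySem.List.enumerate]
  | cons x t ih =>
    intro s
    rw [List.length_cons, List.range_succ_eq_map, List.map_cons, List.map_map]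
    simp only [PySem.List.enumerate, ih (s + 1)]
    refine List.cons_eq_cons.mpr ⟨by simp, ?_⟩
    apply List.map_congr_left
    intro k _
    simp only [Function.comp_apply, List.getD_cons_succ, Prod.mk.injEq]
    constructor
    · push_cast; ring
    · trivial


lemma edgesA_eq (points : List (Int × Int)) :
    (PySem.List.enumerate points).map (fun ip => (ip.2, (PySem.List.pyGet? points (ip.1 - 1)).getD (0, 0)))
      = (List.range points.length).map (edgeAt points) := by
  rw [enum_eq points 0, List.map_map]
  apply List.map_congr_left
  intro k _
  simp [edgeAt]

lemma getD_init (c : List Int) (d : PySem.Dict Int (List Int)) (j : Int) (h : d.getD j [] = []) :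
    ((c.foldl (fun d i => d.insert i ([] : List Int)) d).getD j []) = [] := by
  induction c generalizing d with
  | nil => simpa using h
  | cons i c ih =>
    simp only [List.foldl_cons]
    apply ih
    rw [PySem.Dict.getD_insert]
    split <;> simp [h]

lemma getD_fixed (c : List Int) (d : PySem.Dict Int (List Int)) (k j : Int) :
    ((c.foldl (fun d x => d.insert k (d.getD k [] ++ [x])) d).getD j [])
      = d.getD j [] ++ (if j = k then c else []) := by
  induction c generalizing d with
  | nil => simp
  | cons x c ih =>
    simp only [List.foldl_cons, ih, PySem.Dict.getD_insert]
    by_cases hjk : j = k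
    · subst hjk; simp
    · simp [hjk]

lemma getD_var (c : List Int) (hc : c.Nodup) (d : PySem.Dict Int (List Int)) (v j : Int) :
    ((c.foldl (fun d y => d.insert y (d.getD y [] ++ [v])) d).getD j [])
      = d.getD j [] ++ (if j ∈ c then [v] else []) := by
  induction c generalizing d with
  | nil => simp
  | cons y c ih =>
    obtain ⟨hy, hc'⟩ := List.nodup_cons.mp hc
    simp only [List.foldl_cons, ih hc', PySem.Dict.getD_insert]
    by_cases hjy : j = y
    · subst hjy
      simp [hy]
    · simp [hjy]



lemma get?_updB (d : PySem.Dict Int (Int × Int)) (k x j : Int) :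
    (updB d k x).get? j = if j = k then updO (d.get? k) x else d.get? j := by
  unfold updB
  cases h : d.get? k <;> simp only [updO, PySem.Dict.get?_insert]

lemma get?_updB_var (c : List Int) (hc : c.Nodup) (d : PySem.Dict Int (Int × Int)) (v j : Int) :
    ((c.foldl (fun d y => updB d y v) d).get? j)
      = if j ∈ c then updO (d.get? j) v else d.get? j := by
  induction c generalizing d with
  | nil => simp
  | cons y c ih =>
    obtain ⟨hy, hc'⟩ := List.nodup_cons.mp hc
    simp only [List.foldl_cons, ih hc', get?_updB]
    by_cases hjy : j = y
    · subst hjy; simp [hy]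
    · simp [hjy]



lemma get?_edgeStepB (d : PySem.Dict Int (Int × Int)) (e : (Int × Int) × (Int × Int)) (j : Int) :
    (edgeStepB d e).get? j = stepRow j e (d.get? j) := by
  unfold edgeStepB stepRow
  rw [get?_updB_var _ (nodup_pyRange _ _), get?_updB]
  by_cases hj : j = max e.1.2 e.2.2 <;> simp [hj]

lemma get?_edgesB (es : List ((Int × Int) × (Int × Int))) (d : PySem.Dict Int (Int × Int)) (j : Int) :
    ((es.foldl edgeStepB d).get? j) = es.foldl (fun o e => stepRow j e o) (d.get? j) := by
  induction es generalizing d with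
  | nil => rfl
  | cons e es ih => simp only [List.foldl_cons, ih, get?_edgeStepB]

lemma foldl_min_pyRange (a b : Int) : ∀ acc : Int,
    (PySem.List.pyRange a b).foldl min acc = if a < b then min acc a else acc := by
  intro acc
  generalize hn : (b - a).toNat = n
  induction n generalizing a acc with
  | zero =>
    have h : ¬ a < b := by omega
    rw [PySem.List.pyRange_of_pos a b one_pos]
    simp [h]
  | succ n ih =>
    have h : a < b := by omega
    rw [PySem.List.pyRange_one_cons h, List.foldl_cons, ih (a + 1) (min acc a) (by omega)]
    split_ifs with h2 <;> omega

lemma foldl_max_pyRange (a b : Int) : ∀ acc : Int,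
    (PySem.List.pyRange a b).foldl max acc = if a < b then max acc (b - 1) else acc := by
  intro acc
  generalize hn : (b - a).toNat = n
  induction n generalizing a acc with
  | zero =>
    have h : ¬ a < b := by omega
    rw [PySem.List.pyRange_of_pos a b one_pos]
    simp [h]
  | succ n ih =>
    have h : a < b := by omega
    rw [PySem.List.pyRange_one_cons h, List.foldl_cons, ih (a + 1) (max acc a) (by omega)]
    split_ifs with h2 <;> omega


lemma bnd_append_singleton (xs : List Int) (x : Int) : bnd (xs ++ [x]) = updO (bnd xs) x := by
  cases xs with
  | nil => simp [bnd, updO]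
  | cons h t => simp [bnd, updO, List.foldl_append]

lemma bnd_append_pyRange (xs : List Int) (a b : Int) (hab : a ≤ b) :
    bnd (xs ++ PySem.List.pyRange a (b + 1)) = updO (updO (bnd xs) a) b := by
  have h1 : a < b + 1 := by omega
  cases xs with
  | nil =>
    rw [List.nil_append, PySem.List.pyRange_one_cons h1]
    simp only [bnd, updO, foldl_min_pyRange, foldl_max_pyRange]
    split_ifs with h2 <;> simp only [Option.some.injEq, Prod.mk.injEq] <;> constructor <;> omega
  | cons h t =>
    simp only [List.cons_append, bnd, updO, List.foldl_append, foldl_min_pyRange, foldl_max_pyRange]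
    split_ifs with h2 <;> simp only [Option.some.injEq, Prod.mk.injEq] <;> constructor <;> omega

lemma updO_updO_self (o : Option (Int × Int)) (x : Int) : updO (updO o x) x = updO o x := by
  cases o <;> simp [updO] <;> constructor <;> omega


lemma bnd_chunk (xs : List Int) (j : Int) (e : (Int × Int) × (Int × Int)) :
    bnd (xs ++ chunk j e) = stepRow j e (bnd xs) := by
  unfold chunk stepRow
  by_cases hj : j = max e.1.2 e.2.2
  · have hmem : j ∈ PySem.List.pyRange (min e.1.2 e.2.2) (max e.1.2 e.2.2 + 1) := by
      rw [PySem.List.mem_pyRange_one]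
      omega
    rw [if_pos hj, if_pos hmem, if_pos hj, if_pos hmem, ← List.append_assoc,
      bnd_append_singleton, bnd_append_pyRange _ _ _ (by omega), updO_updO_self]
  · rw [if_neg hj, if_neg hj, List.nil_append]
    by_cases hmem : j ∈ PySem.List.pyRange (min e.1.2 e.2.2) (max e.1.2 e.2.2 + 1)
    · rw [if_pos hmem, if_pos hmem, bnd_append_singleton]
    · rw [if_neg hmem, if_neg hmem, List.append_nil]

lemma bnd_flatMap_chunk (es : List ((Int × Int) × (Int × Int))) (j : Int) : ∀ (xs : List Int),
    bnd (xs ++ es.flatMap (chunk j)) = es.foldl (fun o e => stepRow j e o) (bnd xs) := by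
  induction es with
  | nil => intro xs; simp
  | cons e es ih =>
    intro xs
    rw [List.flatMap_cons, ← List.append_assoc, List.foldl_cons, ← bnd_chunk xs j e]
    exact ih (xs ++ chunk j e)

lemma foldl_min_mem (t : List Int) : ∀ h : Int, t.foldl min h ∈ h :: t := by
  induction t with
  | nil => intro h; simp
  | cons y t ih =>
    intro h
    rw [List.foldl_cons]
    rcases List.mem_cons.mp (ih (min h y)) with h1 | h1
    · rw [h1]; rcases min_choice h y with hm | hm <;> rw [hm] <;> simp
    · simp [h1]

lemma foldl_min_le (t : List Int) : ∀ h y : Int, y ∈ h :: t → t.foldl min h ≤ y := by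
  induction t with
  | nil => intro h y hy; simp only [List.foldl_nil]; simp at hy; omega
  | cons z t ih =>
    intro h y hy
    rw [List.foldl_cons]
    have hle : t.foldl min (min h z) ≤ min h z := ih (min h z) (min h z) (by simp)
    rcases List.mem_cons.mp hy with h1 | h1
    · subst h1; omega
    · rcases List.mem_cons.mp h1 with h2 | h2
      · subst h2; omega
      · exact ih (min h z) y (List.mem_cons_of_mem _ h2)

lemma foldl_max_mem (t : List Int) : ∀ h : Int, t.foldl max h ∈ h :: t := by
  induction t with
  | nil => intro h; simp
  | cons y t ih =>
    intro h
    rw [List.foldl_cons]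
    rcases List.mem_cons.mp (ih (max h y)) with h1 | h1
    · rw [h1]; rcases max_choice h y with hm | hm <;> rw [hm] <;> simp
    · simp [h1]

lemma foldl_max_ge (t : List Int) : ∀ h y : Int, y ∈ h :: t → y ≤ t.foldl max h := by
  induction t with
  | nil => intro h y hy; simp only [List.foldl_nil]; simp at hy; omega
  | cons z t ih =>
    intro h y hy
    rw [List.foldl_cons]
    have hle : max h z ≤ t.foldl max (max h z) := ih (max h z) (max h z) (by simp)
    rcases List.mem_cons.mp hy with h1 | h1
    · subst h1; omega
    · rcases List.mem_cons.mp h1 with h2 | h2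
      · subst h2; omega
      · exact ih (max h z) y (List.mem_cons_of_mem _ h2)

lemma pyGet?_neg_one {α : Type} (s : List α) : PySem.List.pyGet? s (-1) = s.getLast? := by
  cases s with
  | nil => rfl
  | cons a t =>
    simp only [PySem.List.pyGet?, PySem.List.pyIdx?, List.length_cons]
    rw [if_neg (by omega), if_pos (by omega)]
    have h1 : t.length + 1 - (-(-1 : Int)).toNat = t.length := by omega
    rw [List.getLast?_eq_getElem?]
    simp [h1]

lemma pairwise_le_getLast (s : List Int) (hp : s.Pairwise (· ≤ ·)) (hne : s ≠ []) :
    ∀ y ∈ s, y ≤ s.getLast hne := by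
  induction s with
  | nil => simp at hne
  | cons a t ih =>
    obtain ⟨ha, ht⟩ := List.pairwise_cons.mp hp
    cases t with
    | nil => intro y hy; simp at hy; simp [hy]
    | cons b t' =>
      intro y hy
      rw [List.getLast_cons (by simp)]
      rcases List.mem_cons.mp hy with h1 | h1
      · subst h1
        exact le_trans (ha _ (List.getLast_mem _)) (le_refl _)
      · exact ih ht (by simp) y h1

lemma sorted_head_last (h : Int) (t : List Int) :
    (PySem.List.pyGetD (PySem.List.sorted (h :: t) (fun x => x)) 0 0,
     PySem.List.pyGetD (PySem.List.sorted (h :: t) (fun x => x)) (-1) 0)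
      = (t.foldl min h, t.foldl max h) := by
  obtain ⟨m, ts, heq⟩ : ∃ m ts, PySem.List.sorted (h :: t) (fun x => x) = m :: ts := by
    cases hs : PySem.List.sorted (h :: t) (fun x => x) with
    | nil => exact absurd ((PySem.List.sorted_eq_nil_iff _ _ _).mp hs) (by simp)
    | cons m ts => exact ⟨m, ts, rfl⟩
  rw [heq]
  have hmmem : m ∈ h :: t := by
    rw [← PySem.List.mem_sorted (xs := h :: t) (key := fun x => x) (rev := false), heq]
    simp
  have hne : (m :: ts : List Int) ≠ [] := by simp
  have hlast_mem : (m :: ts).getLast hne ∈ h :: t := by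
    rw [← PySem.List.mem_sorted (xs := h :: t) (key := fun x => x) (rev := false), heq]
    exact List.getLast_mem hne
  have h0 : PySem.List.pyGetD (m :: ts) 0 0 = m := by
    have := PySem.List.pyGetD_natCast (m :: ts) 0 0
    simpa using this
  have h1 : PySem.List.pyGetD (m :: ts) (-1) 0 = (m :: ts).getLast hne := by
    rw [PySem.List.pyGetD, pyGet?_neg_one, List.getLast?_eq_some_getLast hne]
    rfl
  rw [h0, h1, Prod.mk.injEq]
  constructor
  · exact le_antisymm
      (PySem.List.key_head_sorted_le (h :: t) (fun x => x) heq _ (foldl_min_mem t h))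
      (foldl_min_le t h m hmmem)
  · refine le_antisymm (foldl_max_ge t h _ hlast_mem) ?_
    have hp : (m :: ts).Pairwise (· ≤ ·) := by
      have := PySem.List.sorted_pairwise (h :: t) (fun x => x)
      rwa [heq] at this
    refine pairwise_le_getLast _ hp hne _ ?_
    rw [← heq, PySem.List.mem_sorted]
    exact foldl_max_mem t h

lemma getD_edgeStepA (d : PySem.Dict Int (List Int)) (e : (Int × Int) × (Int × Int)) (j : Int) :
    (edgeStepA d e).getD j [] = d.getD j [] ++ chunk j e := by
  unfold edgeStepA chunk
  rw [getD_var _ (nodup_pyRange _ _), getD_fixed, List.append_assoc]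

lemma getD_edgesA (es : List ((Int × Int) × (Int × Int))) (d : PySem.Dict Int (List Int)) (j : Int) :
    (es.foldl edgeStepA d).getD j [] = d.getD j [] ++ es.flatMap (chunk j) := by
  induction es generalizing d with
  | nil => simp
  | cons e es ih => rw [List.foldl_cons, ih, getD_edgeStepA, List.flatMap_cons, List.append_assoc]

lemma sea_dicts_eq (sea : List (Int × Int)) :
    sea.foldl seaStepA PySem.Dict.empty
      = sea.foldl (fun d s => d.insert s.2 (d.getD s.2 [] ++ [s.1])) PySem.Dict.empty := by
  apply PySem.List.foldl_congr_mem
  intro d s _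
  unfold seaStepA
  cases hg : d.get? s.2 with
  | none => simp [PySem.Dict.getD_eq_get?_getD, hg]
  | some l => simp [PySem.Dict.getD_eq_get?_getD, hg]

lemma row_eq (lines : PySem.Dict Int (List Int)) (bounds : PySem.Dict Int (Int × Int))
    (seas : PySem.Dict Int (List Int)) (j : Int)
    (hb : bounds.get? j = bnd (lines.getD j [])) (p : List (Int × Int)) :
    rowStepA lines seas p j = p ++ rowOutB bounds seas j := by
  unfold rowStepA rowOutB
  cases hl : lines.getD j [] with
  | nil => rw [hl] at hb; rw [hb]; simp [bnd]
  | cons h t =>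
    rw [hl] at hb
    rw [hb]
    have hpair := sorted_head_last h t
    rw [Prod.mk.injEq] at hpair
    simp only [bnd, hpair.1, hpair.2, List.cons_ne_self, if_neg, reduceCtorEq, ite_false]
    have hbody : ∀ (acc : List (Int × Int)), ∀ x ∈ PySem.List.pyRange (t.foldl min h) (t.foldl max h + 1),
        (fun p i => if (seas.getD j []).contains i then p else p ++ [(i, j)]) acc x
          = (fun p i => if (!(seas.getD j []).contains i) = true then p ++ [(i, j)] else p) acc x := by
      intro acc x _
      by_cases hc : (seas.getD j []).contains x <;> simp [hc]
    rw [PySem.List.foldl_congr_mem _ _ _ _ hbody, PySem.List.foldl_append_if]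

lemma ports_eq (points sea : List (Int × Int)) : by_points points sea = by_points_alt points sea := by
  unfold by_points by_points_alt
  rw [edgesA_eq points, sea_dicts_eq]
  have hB : (PySem.List.pyRange 0 (points.length : Int)).foldl
      (fun d i => edgeStepB d ((PySem.List.pyGet? points i).getD (0, 0), (PySem.List.pyGet? points (i - 1)).getD (0, 0)))
      PySem.Dict.empty
      = ((List.range points.length).map (edgeAt points)).foldl edgeStepB PySem.Dict.empty := by
    rw [PySem.List.pyRange_zero_natCast, List.foldl_map, List.foldl_map]
    apply PySem.List.foldl_congr_mem
    intro d k hk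
    have hk' : k < points.length := List.mem_range.mp hk
    unfold edgeAt
    congr 2
    rw [PySem.List.pyGet?_natCast, List.getD_eq_getElem?_getD]
  rw [hB]
  have hRow : ∀ j : Int,
      (((List.range points.length).map (edgeAt points)).foldl edgeStepB PySem.Dict.empty).get? j
        = bnd ((((List.range points.length).map (edgeAt points)).foldl edgeStepA
            ((PySem.List.pyRange 0 128).foldl (fun d i => d.insert i ([] : List Int)) PySem.Dict.empty)).getD j []) := by
    intro j
    rw [get?_edgesB, PySem.Dict.get?_empty, getD_edgesA,
      getD_init _ _ _ (PySem.Dict.getD_empty _ _), List.nil_append]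
    exact (bnd_flatMap_chunk _ j []).symm
  rw [PySem.List.foldl_congr_mem _ _ (fun p j => p ++ rowOutB
        (((List.range points.length).map (edgeAt points)).foldl edgeStepB PySem.Dict.empty)
        (sea.foldl (fun d s => d.insert s.2 (d.getD s.2 [] ++ [s.1])) PySem.Dict.empty) j) _
      (fun acc j _ => row_eq _ _ _ j (hRow j) acc),
    PySem.List.foldl_append_eq_flatMap, List.nil_append]

-- ===== VERDICT (by name: the statement is the Claim_ definition above) =====
theorem by_points_spec : Claim_equal_by_points := by
  intro points sea _ _
  unfold Spec_by_points
  exact ports_eq points sea
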